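-- pv_equiv track=rewrite | github.com/zzjun725/f1tenth_scripts | src/lab7_pkg/scripts/normal_unit.py | find_max_gap
-- ===== SOURCE A (Python) =====
-- def find_max_gap(block_mask):
--     cur_gap, i, max_gap = 0, 0, 0
--     n = len(block_mask)
--     while i < n:
--         if block_mask[i]:
--             i += 1
--         else:
--             cur_gap = 0
--             while i < n and not block_mask[i]:
--                 cur_gap += 1
--                 i += 1
--             max_gap = max(max_gap, cur_gap)
--     return max_gap
-- ===== SOURCE B (Python) =====
-- def find_max_gap(block_mask):
--     n = len(block_mask)
--     bounds = [-1] + [i for i, b in enumerate(block_mask) if b] + [n]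
--     return max(b - a - 1 for a, b in zip(bounds, bounds[1:]))
-- ===== Notes on version B (the rewrite author's own statement) =====
-- stated objective: alternative
-- what changed: Instead of scanning with run counters, B collects the indices of truthy elements, brackets them with virtual boundaries -1 and n, and returns the maximum difference-minus-one between consecutive boundaries.
import Mathlib
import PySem

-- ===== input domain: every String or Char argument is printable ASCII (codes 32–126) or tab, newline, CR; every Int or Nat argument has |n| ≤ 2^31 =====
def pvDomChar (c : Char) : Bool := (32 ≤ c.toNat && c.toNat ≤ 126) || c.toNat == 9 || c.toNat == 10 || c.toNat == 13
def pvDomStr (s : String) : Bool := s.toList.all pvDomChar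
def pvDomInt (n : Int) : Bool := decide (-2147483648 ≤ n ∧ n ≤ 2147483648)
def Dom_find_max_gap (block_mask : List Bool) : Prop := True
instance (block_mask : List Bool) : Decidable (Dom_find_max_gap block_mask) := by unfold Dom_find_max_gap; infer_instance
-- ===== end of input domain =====

-- B replaces A's run-counting nested while loops by a boundary-index formulation: collect the
-- indices of truthy elements, bracket them with -1 and n, and take the maximum consecutive
-- difference minus one (alternative decomposition, same O(n) cost).

-- ===== PORT A =====
-- inner while loop of A: consumes the leading falsy run, returning (cur_gap, rest)
def pvSpanFalse : List Bool → Int × List Bool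
  | [] => (0, [])
  | b :: rest =>
    if b then (0, b :: rest)
    else
      let p := pvSpanFalse rest
      (p.1 + 1, p.2)

theorem pvSpanFalse_len : ∀ (l : List Bool), (pvSpanFalse l).2.length ≤ l.length := by
  intro l
  induction l with
  | nil => simp [pvSpanFalse]
  | cons b rest ih =>
    by_cases hb : b = true <;> simp [pvSpanFalse, hb] <;> omega

-- outer while loop of A
def pvLoopA : List Bool → Int → Int
  | [], max_gap => max_gap
  | b :: rest, max_gap =>
    if b then pvLoopA rest max_gap
    else
      let p := pvSpanFalse (b :: rest)
      pvLoopA p.2 (max max_gap p.1)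
termination_by l _ => l.length
decreasing_by
  · simp
  · rename_i h
    have hb : b = false := by revert h; cases b <;> simp
    subst hb
    simp only [pvSpanFalse, Bool.false_eq_true, if_false]
    have := pvSpanFalse_len rest
    simpa using Nat.lt_succ_of_le this

def find_max_gap (block_mask : List Bool) : Int :=
  pvLoopA block_mask 0

-- ===== PORT B =====
def find_max_gap_alt (block_mask : List Bool) : Int :=
  let n : Int := (block_mask.length : Int)
  let bounds : List Int :=
    -1 :: (((PySem.List.enumerate block_mask 0).filterMap
              (fun p => if p.2 then some p.1 else none)) ++ [n])
  let diffs : List Int := List.zipWith (fun a b => b - a - 1) bounds bounds.tail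
  match diffs with
  | [] => 0            -- unreachable: bounds always has ≥ 2 elements (Python's max never sees an empty generator)
  | d :: ds => ds.foldl max d

-- ===== PRECONDITION & SPEC =====
def Spec_find_max_gap (block_mask : List Bool) (out : Int) : Prop := out = find_max_gap_alt block_mask
instance (block_mask : List Bool) (out : Int) : Decidable (Spec_find_max_gap block_mask out) := by unfold Spec_find_max_gap; infer_instance

-- ===== CLAIM (what is proved, stated in full; the proofs are below) =====
def Claim_equal_find_max_gap : Prop := ∀ (block_mask : List Bool), Dom_find_max_gap block_mask → Spec_find_max_gap block_mask (find_max_gap block_mask)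

-- ===== LEMMAS AND PROOFS =====

-- reference value: pvN c l = the final max gap, given a pending falsy run of length c before l
def pvN : Int → List Bool → Int
  | c, [] => c
  | c, true :: r => max c (pvN 0 r)
  | c, false :: r => pvN (c + 1) r

theorem pvN_ge : ∀ (l : List Bool) (c : Int), c ≤ pvN c l := by
  intro l
  induction l with
  | nil => intro c; simp [pvN]
  | cons b r ih =>
    intro c
    cases b with
    | true => simp [pvN]
    | false =>
      simp only [pvN, Bool.false_eq_true, if_false]
      have := ih (c + 1)
      omega

-- == A side ==

-- common scan recursion (m = best so far, c = current run)
def pvG : List Bool → Int → Int → Int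
  | [], m, _ => m
  | b :: rest, m, c => if b then pvG rest m 0 else pvG rest (max m (c + 1)) (c + 1)

theorem pvSpan_nonneg : ∀ (l : List Bool), 0 ≤ (pvSpanFalse l).1 := by
  intro l
  induction l with
  | nil => simp [pvSpanFalse]
  | cons b rest ih =>
    by_cases hb : b = true <;> simp [pvSpanFalse, hb] <;> omega

theorem pvSpan_head : ∀ (l : List Bool), (pvSpanFalse l).2 = [] ∨ ∃ r, (pvSpanFalse l).2 = true :: r := by
  intro l
  induction l with
  | nil => simp [pvSpanFalse]
  | cons b rest ih =>
    by_cases hb : b = true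
    · subst hb; right; exact ⟨rest, by simp [pvSpanFalse]⟩
    · have hb' : b = false := by simpa using hb
      subst hb'; simpa [pvSpanFalse] using ih

theorem pvSpan_G : ∀ (l : List Bool) (m c : Int),
    pvG l (max m c) c = pvG (pvSpanFalse l).2 (max m (c + (pvSpanFalse l).1)) (c + (pvSpanFalse l).1) := by
  intro l
  induction l with
  | nil => intro m c; simp [pvSpanFalse]
  | cons b rest ih =>
    intro m c
    cases b with
    | true => simp [pvSpanFalse, pvG]
    | false =>
      simp only [pvSpanFalse, pvG, Bool.false_eq_true, if_false]
      have h1 : max (max m c) (c + 1) = max m (c + 1) := by omega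
      rw [h1]
      have := ih m (c + 1)
      rw [this]
      congr 1 <;> omega

theorem pvLoopA_eq : ∀ (n : Nat) (l : List Bool), l.length ≤ n → ∀ (m : Int), 0 ≤ m → pvLoopA l m = pvG l m 0 := by
  intro n
  induction n with
  | zero =>
    intro l hl m hm
    have : l = [] := by cases l <;> simp_all
    subst this; simp [pvLoopA, pvG]
  | succ n ih =>
    intro l hl m hm
    cases l with
    | nil => simp [pvLoopA, pvG]
    | cons b rest =>
      cases b with
      | true =>
        simp only [pvLoopA, pvG, eq_self_iff_true, if_true]
        exact ih rest (by simpa using Nat.le_of_succ_le_succ hl) m hm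
      | false =>
        simp only [pvLoopA, pvG, Bool.false_eq_true, if_false]
        simp only [pvSpanFalse, Bool.false_eq_true, if_false]
        set g := (pvSpanFalse rest).1 with hg
        set r := (pvSpanFalse rest).2 with hr
        have hgn : 0 ≤ g := pvSpan_nonneg rest
        have hrl : r.length ≤ rest.length := pvSpanFalse_len rest
        have hspan : pvG rest (max m 1) 1 = pvG r (max m (1 + g)) (1 + g) := by
          have := pvSpan_G rest m 1
          simpa [← hg, ← hr] using this
        have e01 : (0 : Int) + 1 = 1 := by norm_num
        rw [e01, hspan]
        set M : Int := max m (1 + g) with hM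
        have hM0 : 0 ≤ M := by simp [hM]; omega
        have hM' : max m (g + 1) = M := by simp [hM]; omega
        rw [hM']
        rcases pvSpan_head rest with hr0 | ⟨r2, hr2⟩
        · rw [← hr] at hr0; rw [hr0]; simp [pvLoopA, pvG]
        · rw [← hr] at hr2
          rw [hr2]
          simp only [pvLoopA, pvG, eq_self_iff_true, if_true]
          have hlen : r2.length ≤ n := by
            rw [hr2] at hrl
            simp at hrl hl
            omega
          exact ih r2 hlen M hM0

theorem pvG_eq_N : ∀ (l : List Bool) (m c : Int), c ≤ m → 0 ≤ m → pvG l m c = max m (pvN c l) := by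
  intro l
  induction l with
  | nil => intro m c h h0; simp [pvG, pvN]; omega
  | cons b r ih =>
    intro m c h h0
    cases b with
    | true =>
      simp only [pvG, pvN, eq_self_iff_true, if_true]
      rw [ih m 0 (by omega) h0]
      rcases le_total c (pvN 0 r) with hc | hc <;> omega
    | false =>
      simp only [pvG, pvN, Bool.false_eq_true, if_false]
      rw [ih (max m (c + 1)) (c + 1) (by omega) (by omega)]
      have := pvN_ge r (c + 1)
      omega

-- == B side ==

def pvIdxs : Int → List Bool → List Int
  | _, [] => []
  | k, true :: r => k :: pvIdxs (k + 1) r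
  | k, false :: r => pvIdxs (k + 1) r

theorem pvEnum_filter : ∀ (l : List Bool) (k : Int),
    (PySem.List.enumerate l k).filterMap (fun p => if p.2 then some p.1 else none) = pvIdxs k l := by
  intro l
  induction l with
  | nil => intro k; simp [PySem.List.enumerate_nil, pvIdxs]
  | cons b r ih =>
    intro k
    cases b <;> simp [PySem.List.enumerate_cons, pvIdxs, ih]

-- max over consecutive boundary differences minus one
def pvGmax : Int → List Int → Int
  | _, [] => 0
  | a, [b] => b - a - 1
  | a, b :: c :: r => max (b - a - 1) (pvGmax b (c :: r))

theorem pvGmax_cons : ∀ (t : List Int) (a b : Int), t ≠ [] →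
    pvGmax a (b :: t) = max (b - a - 1) (pvGmax b t) := by
  intro t a b ht
  cases t with
  | nil => exact absurd rfl ht
  | cons c r => simp [pvGmax]

theorem pvFold_eq_Gmax : ∀ (ys : List Int) (a d : Int), ys ≠ [] →
    List.foldl max d (List.zipWith (fun x y => y - x - 1) (a :: ys) ys) = max d (pvGmax a ys) := by
  intro ys
  induction ys with
  | nil => intro a d h; exact absurd rfl h
  | cons b t ih =>
    intro a d _
    cases t with
    | nil => simp [pvGmax]
    | cons c r =>
      rw [show List.zipWith (fun x y => y - x - 1) (a :: b :: c :: r) (b :: c :: r)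
            = (b - a - 1) :: List.zipWith (fun x y => y - x - 1) (b :: c :: r) (c :: r) from rfl]
      rw [List.foldl_cons]
      rw [ih b (max d (b - a - 1)) (by simp)]
      rw [pvGmax_cons (c :: r) a b (by simp)]
      omega

theorem pvIdxs_key : ∀ (l : List Bool) (p k : Int),
    pvGmax p (pvIdxs k l ++ [k + (l.length : Int)]) = pvN (k - p - 1) l := by
  intro l
  induction l with
  | nil => intro p k; simp [pvIdxs, pvGmax, pvN]
  | cons b r ih =>
    intro p k
    cases b with
    | true =>
      simp only [pvIdxs, pvN, List.cons_append]
      rw [pvGmax_cons _ p k (by simp)]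
      have harith : k + ((true :: r).length : Int) = (k + 1) + (r.length : Int) := by
        simp; omega
      rw [harith, ih k (k + 1)]
      have : k + 1 - k - 1 = 0 := by omega
      rw [this]
    | false =>
      simp only [pvIdxs, pvN, Bool.false_eq_true, if_false]
      have harith : k + ((false :: r).length : Int) = (k + 1) + (r.length : Int) := by
        simp; omega
      rw [harith, ih p (k + 1)]
      have : k + 1 - p - 1 = k - p - 1 + 1 := by omega
      rw [this]

theorem pvAlt_eq_N : ∀ (l : List Bool), find_max_gap_alt l = pvN 0 l := by
  intro l
  have hkey : pvGmax (-1) (pvIdxs 0 l ++ [(l.length : Int)]) = pvN 0 l := by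
    have := pvIdxs_key l (-1) 0
    norm_num at this
    exact this
  obtain ⟨b, t, hbt⟩ : ∃ b t, pvIdxs 0 l ++ [(l.length : Int)] = b :: t := by
    cases h : pvIdxs 0 l with
    | nil => exact ⟨(l.length : Int), [], by simp [h]⟩
    | cons x xs => exact ⟨x, xs ++ [(l.length : Int)], by simp [h]⟩
  unfold find_max_gap_alt
  simp only [pvEnum_filter, hbt, List.tail_cons]
  rw [hbt] at hkey
  cases t with
  | nil =>
    simp only [List.zipWith, List.foldl]
    rw [← hkey]
    simp [pvGmax]
  | cons c r =>
    rw [show List.zipWith (fun a b => b - a - 1) (-1 :: b :: c :: r) (b :: c :: r)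
          = (b - (-1) - 1) :: List.zipWith (fun a b => b - a - 1) (b :: c :: r) (c :: r) from rfl]
    show List.foldl max (b - (-1) - 1) (List.zipWith (fun a b => b - a - 1) (b :: c :: r) (c :: r)) = pvN 0 l
    rw [pvFold_eq_Gmax (c :: r) b (b - (-1) - 1) (by simp)]
    rw [← hkey, pvGmax_cons (c :: r) (-1) b (by simp)]

-- ===== VERDICT (by name: the statement is the Claim_ definition above) =====
theorem find_max_gap_spec : Claim_equal_find_max_gap := by
  intro l _
  unfold Spec_find_max_gap find_max_gap
  rw [pvLoopA_eq l.length l (le_refl _) 0 (le_refl _)]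
  rw [pvG_eq_N l 0 0 (le_refl _) (le_refl _)]
  rw [pvAlt_eq_N l]
  have := pvN_ge l 0
  omega
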